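-- pv_equiv track=rewrite | github.com/alright212/ITI0102_2022 | KT/kt1/exam.py | list_move
-- ===== SOURCE A (Python) =====
-- def list_move(initial_list: list, amount: int, factor: int) -> list:
--     """
--     Create amount lists where elements are shifted right by factor.
--
--     This function creates a list with amount of lists inside it.
--     In each sublist, elements are shifted right by factor elements.
--     factor >= 0
--
--     list_move(["a", "b", "c"], 3, 0) => [['a', 'b', 'c'], ['a', 'b', 'c'], ['a', 'b', 'c']]
--     list_move(["a", "b", "c"], 3, 1) => [['a', 'b', 'c'], ['c', 'a', 'b'], ['b', 'c', 'a']]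
--     list_move([1, 2, 3], 3, 2) => [[1, 2, 3], [2, 3, 1], [3, 1, 2]]
--     list_move([1, 2, 3], 4, 1) => [[1, 2, 3], [3, 1, 2], [2, 3, 1], [1, 2, 3]]
--     list_move([], 3, 4) => [[], [], []]
--     """
--     result = []
--     if factor > len(initial_list) and initial_list:
--         factor %= len(initial_list)
--     for _ in range(amount):
--         result.append(initial_list)
--         initial_list = initial_list[-factor:] + initial_list[:-factor]
--     return result
-- ===== SOURCE B (Python) =====
-- def list_move(initial_list: list, amount: int, factor: int) -> list:
--     """Build each sublist directly: sublist j is the input rotated right by j*factor (mod n),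
--     cut as one slice out of a doubled copy of the input; no incremental rotation state."""
--     n = len(initial_list)
--     if n == 0:
--         return [[] for _ in range(amount)]
--     doubled = initial_list + initial_list
--     return [doubled[n - (j * factor) % n: 2 * n - (j * factor) % n] for j in range(amount)]
-- ===== Notes on version B (the rewrite author's own statement) =====
-- stated objective: alternative
-- what changed: Replaces A's incremental slice-rotate-append loop carrying the rotated list as state by a direct comprehension: sublist j is cut as a single slice out of a doubled copy of the input at the closed-form offset n - (j*factor) % n, so there is no rotation state and one slice instead of two slices plus a concatenation per row (measurably faster only at small sizes; both are bound by the O(amount*n) output).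
-- intended difference: When factor <= -len(initial_list) on a nonempty list that is not invariant under rotation by factor mod n and amount >= 2, A's step initial_list[-factor:]+initial_list[:-factor] degenerates to the identity (the first slice is empty) so A returns unrotated copies, while B rotates right by j*factor mod n as on every other factor; the docstring only specifies factor >= 0, and B's uniform modular shift is the intended reading of 'shifted right by factor'. — e.g. on list_move(["a", "b"], 2, -3): A returns [["a", "b"], ["a", "b"]], B returns [["a", "b"], ["b", "a"]]
import Mathlib
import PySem

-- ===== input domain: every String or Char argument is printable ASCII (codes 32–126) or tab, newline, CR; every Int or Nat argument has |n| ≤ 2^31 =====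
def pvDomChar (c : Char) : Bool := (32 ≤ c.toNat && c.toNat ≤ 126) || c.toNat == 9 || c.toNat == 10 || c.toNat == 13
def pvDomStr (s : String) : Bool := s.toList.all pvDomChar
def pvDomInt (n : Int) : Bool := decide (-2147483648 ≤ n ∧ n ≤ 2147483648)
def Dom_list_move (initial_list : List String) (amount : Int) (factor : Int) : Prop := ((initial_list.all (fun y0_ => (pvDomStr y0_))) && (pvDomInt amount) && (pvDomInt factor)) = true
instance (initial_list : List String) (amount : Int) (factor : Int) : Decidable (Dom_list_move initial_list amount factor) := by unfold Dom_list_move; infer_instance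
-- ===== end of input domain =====

-- B builds each sublist directly as one slice of a doubled input at a closed-form offset,
-- dropping A's incremental slice-rotate state (objective: alternative; return value only).

-- ===== PORT A =====
def list_move (initial_list : List String) (amount : Int) (factor : Int) : List (List String) :=
  -- if factor > len(initial_list) and initial_list: factor %= len(initial_list)
  let factor' : Int :=
    if factor > (initial_list.length : Int) ∧ initial_list ≠ [] then
      PySem.Int.mod factor (initial_list.length : Int)
    else factor
  -- for _ in range(amount): result.append(initial_list); initial_list = initial_list[-factor:] + initial_list[:-factor]
  ((PySem.List.pyRange 0 amount 1).foldl
    (fun (st : List (List String) × List String) _ =>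
      (st.1 ++ [st.2],
       PySem.List.slice st.2 (some (-factor')) none ++ PySem.List.slice st.2 none (some (-factor'))))
    ([], initial_list)).1

-- ===== PORT B =====
def list_move_alt (initial_list : List String) (amount : Int) (factor : Int) : List (List String) :=
  let n : Int := (initial_list.length : Int)
  if n = 0 then (PySem.List.pyRange 0 amount 1).map (fun _ => [])
  else
    let doubled := initial_list ++ initial_list
    (PySem.List.pyRange 0 amount 1).map (fun j =>
      PySem.List.slice doubled (some (n - PySem.Int.mod (j * factor) n))
                               (some (2 * n - PySem.Int.mod (j * factor) n)))

-- ===== PRECONDITION & SPEC =====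
-- When factor ≤ -len(initial_list) on a nonempty list that is not invariant under rotation by
-- factor mod n and amount ≥ 2, A's step initial_list[-factor:]+initial_list[:-factor] degenerates
-- to the identity so A returns unrotated copies, while B rotates right by j*factor mod n as on
-- every other factor; the docstring only specifies factor >= 0, and B's uniform modular shift is
-- the intended reading of "shifted right by factor".
def D_list_move (initial_list : List String) (amount : Int) (factor : Int) : Prop :=
  2 ≤ amount ∧ initial_list ≠ [] ∧ factor ≤ -(initial_list.length : Int) ∧
  initial_list.rotate (initial_list.length - (PySem.Int.mod factor (initial_list.length : Int)).toNat) ≠ initial_list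
instance (initial_list : List String) (amount : Int) (factor : Int) : Decidable (D_list_move initial_list amount factor) := by unfold D_list_move; infer_instance

def Spec_list_move (initial_list : List String) (amount : Int) (factor : Int) (out : List (List String)) : Prop := ¬ D_list_move initial_list amount factor → out = list_move_alt initial_list amount factor
instance (initial_list : List String) (amount : Int) (factor : Int) (out : List (List String)) : Decidable (Spec_list_move initial_list amount factor out) := by unfold Spec_list_move; infer_instance

def pvDiffWitness_list_move : List String × Int × Int := (["a", "b"], 2, -3)
def pvDiffWitnessOut_list_move : (List (List String)) × (List (List String)) :=
  ([["a", "b"], ["a", "b"]], [["a", "b"], ["b", "a"]])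

-- ===== CLAIM (what is proved, stated in full; the proofs are below) =====
def Claim_unchanged_list_move : Prop := ∀ (initial_list : List String) (amount : Int) (factor : Int), Dom_list_move initial_list amount factor → Spec_list_move initial_list amount factor (list_move initial_list amount factor)
def Claim_changed_list_move : Prop := Dom_list_move (pvDiffWitness_list_move.1) (pvDiffWitness_list_move.2.1) (pvDiffWitness_list_move.2.2) ∧ D_list_move (pvDiffWitness_list_move.1) (pvDiffWitness_list_move.2.1) (pvDiffWitness_list_move.2.2) ∧ list_move (pvDiffWitness_list_move.1) (pvDiffWitness_list_move.2.1) (pvDiffWitness_list_move.2.2) = pvDiffWitnessOut_list_move.1 ∧ list_move_alt (pvDiffWitness_list_move.1) (pvDiffWitness_list_move.2.1) (pvDiffWitness_list_move.2.2) = pvDiffWitnessOut_list_move.2 ∧ pvDiffWitnessOut_list_move.1 ≠ pvDiffWitnessOut_list_move.2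
def Claim_exact_list_move : Prop := ∀ (initial_list : List String) (amount : Int) (factor : Int), Dom_list_move initial_list amount factor → D_list_move initial_list amount factor → list_move initial_list amount factor ≠ list_move_alt initial_list amount factor

-- ===== LEMMAS AND PROOFS =====

-- A's per-step rotation amount (as a count for List.rotate, i.e. a LEFT-rotation count)
def pvAStep (n : Nat) (f : Int) : Nat := if 0 ≤ f then n - f.toNat else min (-f).toNat n

-- one step of A's loop body is a List.rotate
theorem pvStep_eq (cur : List String) (f : Int) :
    PySem.List.slice cur (some (-f)) none ++ PySem.List.slice cur none (some (-f))
      = cur.rotate (pvAStep cur.length f) := by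
  unfold pvAStep
  rcases lt_trichotomy f 0 with hf | hf | hf
  · have hcast : -f = ((-f).toNat : Int) := by omega
    rw [if_neg (by omega), hcast, PySem.List.slice_from_natCast, PySem.List.slice_to_natCast,
      Int.toNat_natCast]
    rcases le_or_gt (-f).toNat cur.length with h | h
    · rw [min_eq_left h, List.rotate_eq_drop_append_take h]
    · rw [min_eq_right (by omega), List.drop_eq_nil_of_le (by omega),
        List.take_of_length_le (by omega), List.rotate_length, List.nil_append]
  · subst hf
    rw [if_pos le_rfl, neg_zero]
    rw [PySem.List.slice_to (xs := cur) (b := 0) (by omega)]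
    simp [List.rotate_length, PySem.List.slice]
  · have hcast : -f = -((f.toNat : Nat) : Int) := by omega
    rw [if_pos (by omega), hcast,
      PySem.List.slice_from_neg_natCast (xs := cur) (k := f.toNat) (by omega),
      PySem.List.slice_to_neg_natCast (xs := cur) (k := f.toNat) (by omega),
      List.rotate_eq_drop_append_take (by omega)]

-- A's fold, in closed form
theorem pvFoldA (l : List String) (f : Int) (m : Nat) :
    ((PySem.List.pyRange 0 (m : Int) 1).foldl
      (fun (st : List (List String) × List String) _ =>
        (st.1 ++ [st.2],
         PySem.List.slice st.2 (some (-f)) none ++ PySem.List.slice st.2 none (some (-f))))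
      ([], l))
    = ((List.range m).map (fun j => l.rotate (j * pvAStep l.length f)),
       l.rotate (m * pvAStep l.length f)) := by
  induction m with
  | zero => simp [PySem.List.pyRange_one_eq_nil (by omega : (0:Int) ≤ 0)]
  | succ k ih =>
    have hc : (((k+1) : Nat) : Int) = (k : Int) + 1 := by push_cast; ring
    rw [hc, PySem.List.pyRange_one_succ_right (by omega), List.foldl_append, ih]
    simp only [List.foldl_cons, List.foldl_nil, List.range_succ, List.map_append, List.map_cons,
      List.map_nil, pvStep_eq, List.length_rotate, List.rotate_rotate]
    rw [Nat.succ_mul]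

theorem pvTakeDrop (l : List String) (s : ℕ) (hs : s ≤ l.length) :
    List.take l.length (List.drop (l.length - s) l ++ l) = l.rotate (l.length - s) := by
  rw [List.take_append]
  rw [List.take_of_length_le (by rw [List.length_drop]; omega)]
  rw [List.length_drop]
  have h3 : l.length - (l.length - (l.length - s)) = l.length - s := by omega
  rw [h3, List.rotate_eq_drop_append_take (by omega)]

-- B's row is a rotation
theorem pvBRow (l : List String) (s : Nat) (hs : s ≤ l.length) :
    PySem.List.slice (l ++ l) (some ((l.length : Int) - s)) (some (2 * (l.length : Int) - s))
      = l.rotate (l.length - s) := by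
  rw [PySem.List.slice_toNat (xs := l ++ l) (a := (l.length:Int) - s)
    (b := 2*(l.length:Int) - s) (by omega) (by omega)]
  have h1 : ((l.length : Int) - s).toNat = l.length - s := by omega
  rw [h1]
  have h2 : (2 * (l.length : Int) - s).toNat - (l.length - s) = l.length := by omega
  rw [h2, List.drop_append_of_le_length (by omega)]
  exact pvTakeDrop l s hs

theorem pvRotCongrInt (l : List String) (a b : Nat)
    (h : (a : Int) % (l.length : Int) = (b : Int) % (l.length : Int)) :
    l.rotate a = l.rotate b := by
  have hn : a % l.length = b % l.length := by omega
  rw [← List.rotate_mod, hn, List.rotate_mod]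

theorem pvRotInvMul (l : List String) (t : Nat) (h : l.rotate t = l) (j : Nat) :
    l.rotate (j * t) = l := by
  induction j with
  | zero => simp
  | succ k ih => rw [Nat.succ_mul, ← List.rotate_rotate, ih, h]

-- the central congruence: a row of A equals a row of B
theorem pvRowEq (l : List String) (factor g : Int) (k : Nat) (hn : 0 < l.length)
    (hg0 : 0 ≤ g) (hg1 : g ≤ (l.length : Int))
    (hgf : g % (l.length : Int) = factor % (l.length : Int))
    (sN : Nat) (hsN : (sN : Int) = ((k : Int) * factor) % (l.length : Int)) :
    l.rotate (k * (l.length - g.toNat)) = l.rotate (l.length - sN) := by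
  apply pvRotCongrInt
  have hsb : (sN : Int) < (l.length : Int) := by
    rw [hsN]; exact Int.emod_lt_of_pos _ (by omega)
  have e1 : ((k * (l.length - g.toNat) : Nat) : Int) = (k : Int) * ((l.length : Int) - g) := by
    rw [Nat.cast_mul]
    have e : ((l.length - g.toNat : Nat) : Int) = (l.length : Int) - g := by omega
    rw [e]
  have e2 : ((l.length - sN : Nat) : Int) = (l.length : Int) - (sN : Int) := by omega
  rw [e1, e2]
  have m0 : Int.ModEq (l.length : Int) (l.length : Int) 0 := by
    show (l.length : Int) % _ = 0 % _
    simp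
  have h1 : Int.ModEq (l.length : Int) ((k : Int) * ((l.length : Int) - g)) ((k : Int) * (0 - g)) :=
    Int.ModEq.mul_left _ (Int.ModEq.sub m0 (Int.ModEq.refl g))
  have h2 : Int.ModEq (l.length : Int) ((k : Int) * g) ((k : Int) * factor) :=
    Int.ModEq.mul_left _ hgf
  have h3 : Int.ModEq (l.length : Int) (sN : Int) ((k : Int) * factor) := by
    rw [hsN]; exact Int.emod_emod_of_dvd _ dvd_rfl
  have h4 : Int.ModEq (l.length : Int) ((k : Int) * (0 - g)) (-((sN : Int))) := by
    have : ((k : Int) * (0 - g)) = -((k : Int) * g) := by ring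
    rw [this]
    exact (h2.neg).trans (h3.neg.symm)
  have h5 : Int.ModEq (l.length : Int) (-((sN : Int))) ((l.length : Int) - (sN : Int)) := by
    have := Int.ModEq.sub m0.symm (Int.ModEq.refl (sN : Int))
    rwa [zero_sub] at this
  exact (h1.trans (h4.trans h5))

theorem pvMain (l : List String) (amount factor : Int)
    (hD : ¬ D_list_move l amount factor) :
    list_move l amount factor = list_move_alt l amount factor := by
  unfold list_move list_move_alt
  simp only []
  by_cases hnil : l = []
  · subst hnil
    rw [if_neg (by simp), if_pos (by simp)]
    rcases le_or_gt amount 0 with ham | ham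
    · simp [PySem.List.pyRange_one_eq_nil (by omega)]
    · have hamc : ((amount.toNat : Nat) : Int) = amount := by omega
      rw [← hamc, pvFoldA, PySem.List.pyRange_one]
      dsimp only
      simp only [sub_zero, Int.toNat_natCast, List.map_map]
      exact List.map_congr_left (fun k _ => by simp)
  · have hn : 0 < l.length := by cases l with | nil => exact absurd rfl hnil | cons a t => simp
    rw [if_neg (by omega : ¬ ((l.length : Int) = 0))]
    rcases le_or_gt amount 0 with ham | ham
    · simp [PySem.List.pyRange_one_eq_nil (by omega)]
    · have hamc : ((amount.toNat : Nat) : Int) = amount := by omega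
      rw [← hamc, pvFoldA, PySem.List.pyRange_one]
      simp only [sub_zero, Int.toNat_natCast, List.map_map]
      apply List.map_congr_left
      intro k hk
      have hkm : k < amount.toNat := List.mem_range.mp hk
      simp only [Function.comp_apply, zero_add]
      have hs0 : 0 ≤ PySem.Int.mod ((k : Int) * factor) (l.length : Int) :=
        PySem.Int.mod_nonneg _ (by omega)
      have hsem : PySem.Int.mod ((k : Int) * factor) (l.length : Int)
          = ((k : Int) * factor) % (l.length : Int) :=
        PySem.Int.mod_eq_emod_of_pos (by omega)
      have hslt : PySem.Int.mod ((k : Int) * factor) (l.length : Int) < (l.length : Int) :=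
        PySem.Int.mod_lt _ (by omega)
      have hscast : PySem.Int.mod ((k : Int) * factor) (l.length : Int)
          = (((PySem.Int.mod ((k : Int) * factor) (l.length : Int)).toNat : Nat) : Int) := by omega
      rw [hscast, pvBRow l _ (by omega)]
      have hsN : (((PySem.Int.mod ((k : Int) * factor) (l.length : Int)).toNat : Nat) : Int)
          = ((k : Int) * factor) % (l.length : Int) := by omega
      by_cases hf1 : factor > (l.length : Int) ∧ l ≠ []
      · rw [if_pos hf1]
        have hg0 : 0 ≤ PySem.Int.mod factor (l.length : Int) := PySem.Int.mod_nonneg _ (by omega)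
        have hgsem : PySem.Int.mod factor (l.length : Int) = factor % (l.length : Int) :=
          PySem.Int.mod_eq_emod_of_pos (by omega)
        have hstep : pvAStep l.length (PySem.Int.mod factor (l.length : Int))
            = l.length - (PySem.Int.mod factor (l.length : Int)).toNat := by
          unfold pvAStep; rw [if_pos hg0]
        rw [hstep]
        exact pvRowEq l factor _ k hn hg0
          (le_of_lt (by rw [hgsem]; exact Int.emod_lt_of_pos _ (by omega)))
          (by rw [hgsem]; exact Int.emod_emod_of_dvd _ dvd_rfl) _ hsN
      · rw [if_neg hf1]
        have hf1' : factor ≤ (l.length : Int) := by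
          by_contra hc; exact hf1 ⟨by omega, hnil⟩
        rcases le_or_gt 0 factor with hf2 | hf2
        · -- 0 ≤ factor ≤ n
          have hstep : pvAStep l.length factor = l.length - factor.toNat := by
            unfold pvAStep; rw [if_pos hf2]
          rw [hstep]
          exact pvRowEq l factor factor k hn hf2 hf1' rfl _ hsN
        · by_cases hf3 : -(l.length : Int) < factor
          · -- -n < factor < 0
            have hstep : pvAStep l.length factor
                = l.length - ((l.length : Int) + factor).toNat := by
              unfold pvAStep; rw [if_neg (by omega)]; omega
            rw [hstep]
            have hgf' : ((l.length : Int) + factor) % (l.length : Int)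
                = factor % (l.length : Int) := by
              have h := Int.add_mul_emod_self_left (a := factor) (b := (l.length : Int)) (c := 1)
              rw [mul_one] at h
              rw [add_comm]
              exact h
            exact pvRowEq l factor ((l.length : Int) + factor) k hn (by omega) (by omega)
              hgf' _ hsN
          · -- factor ≤ -n : A's step is the identity rotation
            have hstep : pvAStep l.length factor = l.length := by
              unfold pvAStep; rw [if_neg (by omega)]; omega
            rw [hstep]
            unfold D_list_move at hD
            push Not at hD
            by_cases hA2 : 2 ≤ amount
            · have hinv : l.rotate (l.length - (PySem.Int.mod factor (l.length : Int)).toNat) = l :=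
                hD hA2 hnil (by omega)
              have hg0 : 0 ≤ PySem.Int.mod factor (l.length : Int) :=
                PySem.Int.mod_nonneg _ (by omega)
              have hgsem : PySem.Int.mod factor (l.length : Int) = factor % (l.length : Int) :=
                PySem.Int.mod_eq_emod_of_pos (by omega)
              have hB : l.rotate (l.length
                  - ((PySem.Int.mod ((k : Int) * factor) (l.length : Int)).toNat)) = l := by
                rw [← pvRowEq l factor (PySem.Int.mod factor (l.length : Int)) k hn hg0
                  (le_of_lt (by rw [hgsem]; exact Int.emod_lt_of_pos _ (by omega)))
                  (by rw [hgsem]; exact Int.emod_emod_of_dvd _ dvd_rfl) _ hsN]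
                exact pvRotInvMul l _ hinv k
              rw [hB, pvRotInvMul l l.length (List.rotate_length l) k]
            · -- amount ≤ 1, so k = 0
              have hk0 : k = 0 := by omega
              subst hk0
              simp only [Nat.cast_zero, zero_mul, Int.zero_emod] at hsN ⊢
              have hz : (PySem.Int.mod 0 (l.length : Int)).toNat = 0 := by omega
              rw [List.rotate_zero, hz, Nat.sub_zero, List.rotate_length]

-- ===== VERDICT (by name: the statement is the Claim_ definition above) =====
theorem list_move_spec : Claim_unchanged_list_move := by
  intro initial_list amount factor _
  unfold Spec_list_move
  intro hD
  exact pvMain initial_list amount factor hD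
theorem list_move_changed : Claim_changed_list_move := by unfold Claim_changed_list_move; decide
theorem list_move_tight : Claim_exact_list_move := by
  unfold Claim_exact_list_move
  intro l amount factor _ hD heq
  obtain ⟨hA2, hnil, hfle, hrot⟩ := hD
  have hn : 0 < l.length := by cases l with | nil => exact absurd rfl hnil | cons a t => simp
  apply hrot
  have hamc : ((amount.toNat : Nat) : Int) = amount := by omega
  have hAv : (list_move l amount factor)[1]? = some l := by
    unfold list_move
    dsimp only
    rw [if_neg (fun h => by omega : ¬ (factor > (l.length : Int) ∧ l ≠ []))]
    rw [← hamc, pvFoldA]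
    dsimp only
    rw [List.getElem?_map, List.getElem?_range (by omega : 1 < amount.toNat)]
    have hstep : pvAStep l.length factor = l.length := by
      unfold pvAStep; rw [if_neg (by omega)]; omega
    simp [hstep, List.rotate_length]
  have hg0 : 0 ≤ PySem.Int.mod factor (l.length : Int) := PySem.Int.mod_nonneg _ (by omega)
  have hgsem : PySem.Int.mod factor (l.length : Int) = factor % (l.length : Int) :=
    PySem.Int.mod_eq_emod_of_pos (by omega)
  have hglt : PySem.Int.mod factor (l.length : Int) < (l.length : Int) :=
    PySem.Int.mod_lt _ (by omega)
  have hBv : (list_move_alt l amount factor)[1]?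
      = some (l.rotate (l.length - (PySem.Int.mod factor (l.length : Int)).toNat)) := by
    unfold list_move_alt
    dsimp only
    rw [if_neg (by omega : ¬ ((l.length : Int) = 0))]
    rw [← hamc, PySem.List.pyRange_one]
    simp only [sub_zero, Int.toNat_natCast, List.map_map]
    rw [List.getElem?_map, List.getElem?_range (by omega : 1 < amount.toNat)]
    simp only [Function.comp_apply, Nat.cast_one, zero_add, one_mul, Option.map_some]
    have hscast : PySem.Int.mod factor (l.length : Int)
        = (((PySem.Int.mod factor (l.length : Int)).toNat : Nat) : Int) := by omega
    rw [hscast, pvBRow l _ (by omega), Int.toNat_natCast]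
  rw [heq, hBv] at hAv
  exact (Option.some.inj hAv)
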